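-- pv_equiv track=rewrite | github.com/manuelrubio/recursion | chapter05/listing_05_16.py | compute_wood
-- ===== SOURCE A (Python) =====
-- def compute_wood(t, h):
--     if t == []:
--         return 0
--     else:
--         if t[0] > h:
--             return t[0] - h + compute_wood(t[1:], h)
--         else:
--             return compute_wood(t[1:], h)
-- ===== SOURCE B (Python) =====
-- def compute_wood(t, h):
--     total = 0
--     for x in t:
--         if x > h:
--             total += x - h
--     return total
-- ===== Notes on version B (the rewrite author's own statement) =====
-- stated objective: faster
-- what changed: Replaced the recursion that repeatedly slices t[1:] (quadratic copying, recursion depth = len(t)) with a single iterative pass accumulating x-h for x>h.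
import Mathlib
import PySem

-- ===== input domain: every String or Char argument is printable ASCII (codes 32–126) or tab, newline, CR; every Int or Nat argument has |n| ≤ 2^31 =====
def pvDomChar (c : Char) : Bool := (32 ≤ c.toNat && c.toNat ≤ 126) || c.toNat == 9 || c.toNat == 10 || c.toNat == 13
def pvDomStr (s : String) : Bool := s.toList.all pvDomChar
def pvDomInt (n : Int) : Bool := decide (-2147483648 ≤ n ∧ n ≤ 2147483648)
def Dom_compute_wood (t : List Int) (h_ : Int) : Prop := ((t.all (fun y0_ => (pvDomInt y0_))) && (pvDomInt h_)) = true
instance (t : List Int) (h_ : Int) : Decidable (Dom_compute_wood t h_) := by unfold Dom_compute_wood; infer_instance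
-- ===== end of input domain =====

-- B replaces A's recursive slicing (t[1:]) with a single-pass accumulating loop: faster.


-- ===== PORT A =====
def compute_wood (t : List Int) (h_ : Int) : Int :=
  match t with
  | [] => 0
  | x :: rest =>
    if x > h_ then x - h_ + compute_wood rest h_
    else compute_wood rest h_

-- ===== PORT B =====
def compute_wood_alt (t : List Int) (h_ : Int) : Int :=
  t.foldl (fun total x => if x > h_ then total + (x - h_) else total) 0

-- ===== PRECONDITION & SPEC =====
def Spec_compute_wood (t : List Int) (h_ : Int) (out : Int) : Prop := out = compute_wood_alt t h_
instance (t : List Int) (h_ : Int) (out : Int) : Decidable (Spec_compute_wood t h_ out) := by unfold Spec_compute_wood; infer_instance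

-- ===== CLAIM (what is proved, stated in full; the proofs are below) =====
def Claim_equal_compute_wood : Prop := ∀ (t : List Int) (h_ : Int), Dom_compute_wood t h_ → Spec_compute_wood t h_ (compute_wood t h_)

-- ===== LEMMAS AND PROOFS =====

-- ===== VERDICT (by name: the statement is the Claim_ definition above) =====
lemma alt_acc (t : List Int) (h_ acc : Int) :
    t.foldl (fun total x => if x > h_ then total + (x - h_) else total) acc
      = acc + compute_wood t h_ := by
  induction t generalizing acc with
  | nil => simp [compute_wood]
  | cons x rest ih =>
    simp only [List.foldl, compute_wood]
    split_ifs with hx <;> rw [ih] <;> ring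

theorem compute_wood_spec : Claim_equal_compute_wood := by
  intro t h_ _
  unfold Spec_compute_wood compute_wood_alt
  rw [alt_acc]; ring
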